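-- pv_equiv track=rewrite | github.com/f-martini/SympleQ | scripts/experiments/symmetries/src/clifford.py | make_graph_dictionary
-- ===== SOURCE A (Python) =====
-- def make_graph_dictionary(independent_paulis, dependencies, weights):
--
--     graph_dict = {}
--
--     for i in independent_paulis:
--         key = weights[i]
--         if key in graph_dict:
--             graph_dict[key].append([i])
--         else:
--             graph_dict[key] = [[i]]
--
--     for i in dependencies.keys():
--         key = weights[i]
--         dependency = dependencies[i]
--         dependence_indices = [x[0] for x in dependency]
--         # dependence_multiplicities = [x[1] for x in dependency]  # this will be needed for qudits! always 1 for now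
--         if key in graph_dict:
--             graph_dict[key].append(dependence_indices)
--         else:
--             graph_dict[key] = [dependence_indices]
--
--     return graph_dict
-- ===== SOURCE B (Python) =====
-- def make_graph_dictionary(independent_paulis, dependencies, weights):
--     pairs = [(weights[i], [i]) for i in independent_paulis]
--     pairs += [(weights[i], [x[0] for x in dep]) for i, dep in dependencies.items()]
--     keys = dict.fromkeys(k for k, _ in pairs)
--     return {k: [p for k2, p in pairs if k2 == k] for k in keys}
-- ===== Notes on version B (the rewrite author's own statement) =====
-- stated objective: alternative
-- what changed: B builds one combined (weight, payload) stream first, then forms the dict by an ordered dedup of the weight keys plus a per-key filter over the stream, instead of A's incremental per-element dict accumulation; Pre_ excludes the inputs where A raises (an index missing from weights, an empty dependency entry) and association lists with duplicate keys, which do not represent a Python dict.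
import Mathlib
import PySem

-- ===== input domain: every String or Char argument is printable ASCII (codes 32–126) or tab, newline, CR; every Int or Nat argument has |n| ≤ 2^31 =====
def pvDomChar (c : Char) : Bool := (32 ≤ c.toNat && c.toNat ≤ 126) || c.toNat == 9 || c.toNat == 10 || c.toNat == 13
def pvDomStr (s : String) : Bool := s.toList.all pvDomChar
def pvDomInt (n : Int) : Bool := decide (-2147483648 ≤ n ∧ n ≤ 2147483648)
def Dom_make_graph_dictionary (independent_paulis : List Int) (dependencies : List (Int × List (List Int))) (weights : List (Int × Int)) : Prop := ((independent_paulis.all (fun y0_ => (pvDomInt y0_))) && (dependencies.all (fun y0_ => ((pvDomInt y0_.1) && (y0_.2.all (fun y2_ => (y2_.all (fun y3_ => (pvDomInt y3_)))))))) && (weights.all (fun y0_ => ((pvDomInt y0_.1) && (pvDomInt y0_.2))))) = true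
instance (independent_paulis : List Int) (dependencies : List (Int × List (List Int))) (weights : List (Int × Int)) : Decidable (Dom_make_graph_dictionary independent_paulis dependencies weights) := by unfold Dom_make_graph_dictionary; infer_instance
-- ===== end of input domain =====

-- B replaces A's incremental per-element dict accumulation by one combined (weight, payload)
-- stream followed by an ordered key dedup and a per-key filter (alternative decomposition, same result).

-- ===== PORT A =====
def make_graph_dictionary (independent_paulis : List Int) (dependencies : List (Int × List (List Int))) (weights : List (Int × Int)) : List (Int × List (List Int)) :=
  let w := PySem.Dict.mk weights
  let d := PySem.Dict.mk dependencies
  let g1 := independent_paulis.foldl (fun g i =>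
      let key := w.getD i 0        -- weights[i]; Pre_ guarantees the key is present (KeyError excluded)
      if g.contains key then g.insert key (g.getD key [] ++ [[i]])
      else g.insert key [[i]]) PySem.Dict.empty
  let g2 := (PySem.Dict.keys d).foldl (fun g i =>
      let key := w.getD i 0
      let dependency := (d.get? i).getD []   -- dependencies[i]; i comes from d.keys so the lookup succeeds
      let dependence_indices := dependency.map (fun x => (PySem.List.pyGet? x 0).getD 0)  -- x[0]; Pre_ excludes empty x (IndexError)
      if g.contains key then g.insert key (g.getD key [] ++ [dependence_indices])
      else g.insert key [dependence_indices]) g1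
  g2.items

-- ===== PORT B =====
def make_graph_dictionary_alt (independent_paulis : List Int) (dependencies : List (Int × List (List Int))) (weights : List (Int × Int)) : List (Int × List (List Int)) :=
  let w := PySem.Dict.mk weights
  let d := PySem.Dict.mk dependencies
  let pairs := independent_paulis.map (fun i => (w.getD i 0, [i]))
      ++ d.items.map (fun p => (w.getD p.1 0, p.2.map (fun x => (PySem.List.pyGet? x 0).getD 0)))
  (PySem.List.dedup (pairs.map (·.1))).map (fun k => (k, (pairs.filter (fun q => q.1 == k)).map (·.2)))

-- ===== PRECONDITION & SPEC =====
-- Pre_ excludes the inputs where A raises (an index missing from weights → KeyError; an empty inner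
-- dependency list → IndexError on x[0]) and association lists with duplicate keys, which do not
-- represent a Python dict (a Python dict collapses duplicates, so such Lean inputs are ambiguous).
def Pre_make_graph_dictionary (independent_paulis : List Int) (dependencies : List (Int × List (List Int))) (weights : List (Int × Int)) : Prop :=
  (weights.map (·.1)).Nodup ∧ (dependencies.map (·.1)).Nodup ∧
  (∀ i ∈ independent_paulis, i ∈ weights.map (·.1)) ∧
  (∀ p ∈ dependencies, p.1 ∈ weights.map (·.1) ∧ ∀ x ∈ p.2, x ≠ [])
instance (independent_paulis : List Int) (dependencies : List (Int × List (List Int))) (weights : List (Int × Int)) : Decidable (Pre_make_graph_dictionary independent_paulis dependencies weights) := by unfold Pre_make_graph_dictionary; infer_instance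

def pvWitness_make_graph_dictionary : List Int × (List (Int × List (List Int))) × (List (Int × Int)) :=
  ([0, 1], [(2, [[3, 1], [4, 1]])], [(0, 7), (1, 7), (2, 9)])

def Spec_make_graph_dictionary (independent_paulis : List Int) (dependencies : List (Int × List (List Int))) (weights : List (Int × Int)) (out : List (Int × List (List Int))) : Prop := out = make_graph_dictionary_alt independent_paulis dependencies weights
instance (independent_paulis : List Int) (dependencies : List (Int × List (List Int))) (weights : List (Int × Int)) (out : List (Int × List (List Int))) : Decidable (Spec_make_graph_dictionary independent_paulis dependencies weights out) := by unfold Spec_make_graph_dictionary; infer_instance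

-- ===== CLAIM (what is proved, stated in full; the proofs are below) =====
def Claim_equal_make_graph_dictionary : Prop := ∀ (independent_paulis : List Int) (dependencies : List (Int × List (List Int))) (weights : List (Int × Int)), Dom_make_graph_dictionary independent_paulis dependencies weights → Pre_make_graph_dictionary independent_paulis dependencies weights → Spec_make_graph_dictionary independent_paulis dependencies weights (make_graph_dictionary independent_paulis dependencies weights)

-- ===== LEMMAS AND PROOFS =====

-- A's if-contains-append-else-new branch is exactly dict.modify with default [].
theorem step_eq_modify (g : PySem.Dict Int (List (List Int))) (key : Int) (v : List Int) :
    (if g.contains key then g.insert key (g.getD key [] ++ [v]) else g.insert key [v])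
      = g.modify key [] (· ++ [v]) := by
  by_cases h : g.contains key = true
  · simp [h, PySem.Dict.modify]
  · simp at h
    simp [h, PySem.Dict.modify, PySem.Dict.getD_of_not_contains (h := h)]

-- The combined (key, payload) stream both programs are about, and the grouping step.
theorem grouped_items (stream : List (Int × List Int)) :
    ((stream.foldl (fun g p => g.modify p.1 [] (· ++ [p.2])) PySem.Dict.empty).items)
      = (PySem.List.dedup (stream.map (·.1))).map
          (fun k => (k, (stream.filter (fun q => q.1 == k)).map (·.2))) := by
  have hnd : (stream.foldl (fun g p => g.modify p.1 [] (· ++ [p.2])) PySem.Dict.empty).keys.Nodup :=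
    PySem.Dict.nodup_keys_foldl_modify_key stream (·.1) [] (fun g p => (· ++ [p.2]))
      PySem.Dict.empty (by simp)
  rw [PySem.Dict.items_eq_map_keys _ hnd []]
  rw [PySem.Dict.keys_foldl_modify_key]
  simp only [PySem.Dict.keys_empty, PySem.Set.update_nil_left, PySem.List.dedup_eq_ofList,
    PySem.Dict.getD_foldl_modify_append, PySem.Dict.getD_empty, List.nil_append]

theorem make_graph_dictionary_spec : Claim_equal_make_graph_dictionary := by
  intro ips deps wts _ hpre
  obtain ⟨-, hd, -, -⟩ := hpre
  unfold Spec_make_graph_dictionary make_graph_dictionary make_graph_dictionary_alt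
  simp only [step_eq_modify]
  rw [show (PySem.Dict.mk deps).keys = deps.map (·.1) from rfl, List.foldl_map]
  rw [PySem.List.foldl_congr_mem' _ _
      (g := fun (g : PySem.Dict Int (List (List Int))) (p : Int × List (List Int)) =>
        g.modify ((PySem.Dict.mk wts).getD p.1 0) []
          (· ++ [p.2.map (fun x => (PySem.List.pyGet? x 0).getD 0)]))
      _ ?hcong]
  case hcong =>
    intro p hp g
    have hg : (PySem.Dict.mk deps).get? p.1 = some p.2 :=
      PySem.Dict.get?_of_mem_items (d := PySem.Dict.mk deps) (by exact hp) (by exact hd)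
    simp [hg]
  have hA : ((ips.map (fun i => ((PySem.Dict.mk wts).getD i 0, [i]))
        ++ deps.map (fun p => ((PySem.Dict.mk wts).getD p.1 0,
              p.2.map (fun x => (PySem.List.pyGet? x 0).getD 0)))).foldl
        (fun (g : PySem.Dict Int (List (List Int))) (q : Int × List Int) =>
          g.modify q.1 [] (· ++ [q.2])) PySem.Dict.empty)
      = deps.foldl
          (fun g p => g.modify ((PySem.Dict.mk wts).getD p.1 0) []
            (· ++ [p.2.map (fun x => (PySem.List.pyGet? x 0).getD 0)]))
          (ips.foldl (fun g i => g.modify ((PySem.Dict.mk wts).getD i 0) [] (· ++ [[i]]))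
            PySem.Dict.empty) := by
    rw [List.foldl_append, List.foldl_map, List.foldl_map]
  rw [← hA, grouped_items]
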